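-- pv_equiv track=rewrite | github.com/fbyukgo/loci-networks | graph_network_analysis.py | get_analysis_combination
-- ===== SOURCE A (Python) =====
-- from itertools import combinations
--
-- def get_analysis_combination(analysis_list):
--     combination_dict = {}
--     analysis_dict = {}
--     c = 1
--     while c <= len(analysis_list):
--         combination = list(combinations(analysis_list, c))
--         combination_dict[c] = combination
--         c += 1
--
--     for comb  in combination_dict.values():
--         for ele in comb:
--             analysis_name = "_".join(ele)
--             status_dict = {}
--             for analysis in analysis_list:
--                 status_dict[analysis] = 0
--                 if analysis in ele:
--                     status_dict[analysis] = 1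
--                 analysis_dict[analysis_name] = status_dict
--     return analysis_dict
-- ===== SOURCE B (Python) =====
-- def get_analysis_combination(analysis_list):
--     def combos(lst, c):
--         if c == 0:
--             return [()]
--         if not lst:
--             return []
--         head, tail = lst[0], lst[1:]
--         return [(head,) + rest for rest in combos(tail, c - 1)] + combos(tail, c)
--
--     result = {}
--     for c in range(1, len(analysis_list) + 1):
--         for ele in combos(analysis_list, c):
--             result["_".join(ele)] = {a: (1 if a in ele else 0) for a in analysis_list}
--     return result
-- ===== Notes on version B (the rewrite author's own statement) =====
-- stated objective: simpler
-- what changed: B drops the size-keyed combination_dict table and itertools, generating each subset with a hand-written recursive combination generator in one pass and building each status dict with a single dict comprehension instead of A's incremental per-key rewrites.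
import Mathlib
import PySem

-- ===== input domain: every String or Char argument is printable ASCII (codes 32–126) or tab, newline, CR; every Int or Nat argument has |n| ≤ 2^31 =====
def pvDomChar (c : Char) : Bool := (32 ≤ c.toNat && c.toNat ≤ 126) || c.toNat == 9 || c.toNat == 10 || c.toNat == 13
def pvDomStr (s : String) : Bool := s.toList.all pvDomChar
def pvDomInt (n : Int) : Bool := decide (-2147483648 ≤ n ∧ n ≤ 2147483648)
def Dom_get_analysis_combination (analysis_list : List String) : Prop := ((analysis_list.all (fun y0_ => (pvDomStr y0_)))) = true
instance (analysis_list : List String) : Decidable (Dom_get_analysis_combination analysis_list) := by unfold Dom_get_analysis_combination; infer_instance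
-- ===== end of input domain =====

-- B replaces itertools.combinations and the size-keyed combination_dict table by a single
-- pass with a hand-written recursive subset generator and a dict comprehension (objective:
-- simpler, one pass, no intermediate table).

-- ===== PORT A =====
-- the 'while c <= len' counting loop is ported as a fold over range(1, len+1);
-- itertools.combinations is PySem.List.combinations (CPython order)
def get_analysis_combination (analysis_list : List String) : List (String × List (String × Int)) :=
  let combination_dict : PySem.Dict Int (List (List String)) :=
    (PySem.List.pyRange 1 ((analysis_list.length : Int) + 1) 1).foldl
      (fun d c => d.insert c (PySem.List.combinations analysis_list c.toNat)) PySem.Dict.empty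
  let analysis_dict : PySem.Dict String (PySem.Dict String Int) :=
    combination_dict.values.foldl (fun ad comb =>
      comb.foldl (fun ad ele =>
        let analysis_name := PySem.Str.join "_" ele
        (analysis_list.foldl
          (fun (st : PySem.Dict String Int × PySem.Dict String (PySem.Dict String Int)) analysis =>
            let sd := st.1.insert analysis 0
            let sd := if ele.contains analysis then sd.insert analysis 1 else sd
            (sd, st.2.insert analysis_name sd))
          (PySem.Dict.empty, ad)).2) ad) PySem.Dict.empty
  analysis_dict.items.map (fun p => (p.1, p.2.items))

-- ===== PORT B =====
-- Source B's recursive combos(lst, c)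
def pvCombosB : Nat → List String → List (List String)
  | 0, _ => [[]]
  | _ + 1, [] => []
  | c + 1, h :: t => (pvCombosB c t).map (fun rest => h :: rest) ++ pvCombosB (c + 1) t

def get_analysis_combination_alt (analysis_list : List String) : List (String × List (String × Int)) :=
  let result : PySem.Dict String (PySem.Dict String Int) :=
    (List.range' 1 analysis_list.length).foldl (fun res c =>
      (pvCombosB c analysis_list).foldl (fun res ele =>
        res.insert (PySem.Str.join "_" ele)
          (PySem.Dict.ofList (analysis_list.map
            (fun a => (a, if ele.contains a then (1 : Int) else 0))))) res)
      PySem.Dict.empty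
  result.items.map (fun p => (p.1, p.2.items))

-- ===== PRECONDITION & SPEC =====
def Spec_get_analysis_combination (analysis_list : List String) (out : List (String × List (String × Int))) : Prop := out = get_analysis_combination_alt analysis_list
instance (analysis_list : List String) (out : List (String × List (String × Int))) : Decidable (Spec_get_analysis_combination analysis_list out) := by unfold Spec_get_analysis_combination; infer_instance

-- ===== CLAIM (what is proved, stated in full; the proofs are below) =====
def Claim_equal_get_analysis_combination : Prop := ∀ (analysis_list : List String), Dom_get_analysis_combination analysis_list → Spec_get_analysis_combination analysis_list (get_analysis_combination analysis_list)

-- ===== LEMMAS AND PROOFS =====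

-- B's recursive generator produces exactly itertools.combinations' list
lemma pvCombosB_eq_combinations : ∀ (c : Nat) (l : List String),
    pvCombosB c l = PySem.List.combinations l c := by
  intro c
  induction c with
  | zero => intro l; simp [pvCombosB, PySem.List.combinations_zero]
  | succ c ih =>
    intro l
    induction l with
    | nil => simp [pvCombosB, PySem.List.combinations_nil_succ]
    | cons h t iht =>
      simp [pvCombosB, PySem.List.combinations_cons_succ, ih, iht]

-- A's incremental status loop, from a nonempty analysis_list, inserts the final status dict once
lemma statusLoop (ele : List String) (name : String) :
    ∀ (l : List String), l ≠ [] → ∀ (sd0 : PySem.Dict String Int)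
      (ad : PySem.Dict String (PySem.Dict String Int)),
    (l.foldl
      (fun (st : PySem.Dict String Int × PySem.Dict String (PySem.Dict String Int)) a =>
        ((if ele.contains a then (st.1.insert a 0).insert a 1 else st.1.insert a 0),
         st.2.insert name (if ele.contains a then (st.1.insert a 0).insert a 1 else st.1.insert a 0)))
      (sd0, ad)).2
    = ad.insert name
        (l.foldl (fun sd a => if ele.contains a then (sd.insert a 0).insert a 1 else sd.insert a 0) sd0) := by
  intro l
  induction l with
  | nil => intro h; exact absurd rfl h
  | cons a l ih =>
    intro _ sd0 ad
    by_cases hl : l = []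
    · subst hl; simp [List.foldl]
    · simp only [List.foldl]
      rw [ih hl, PySem.Dict.insert_insert_self]

-- A's per-element status fold equals B's comprehension dict
lemma statusDict (ele : List String) (l : List String) :
    l.foldl (fun sd a => if ele.contains a then (sd.insert a 0).insert a 1 else sd.insert a 0)
      PySem.Dict.empty
    = PySem.Dict.ofList (l.map (fun a => (a, if ele.contains a then (1 : Int) else 0))) := by
  have hof : PySem.Dict.ofList (l.map (fun a => (a, if ele.contains a then (1 : Int) else 0)))
      = l.foldl (fun sd a => sd.insert a (if ele.contains a then (1 : Int) else 0))
          PySem.Dict.empty := by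
    simp [PySem.Dict.ofList, PySem.Dict.update, List.foldl_map]
  rw [hof]
  apply PySem.List.foldl_congr_mem
  intro sd a _
  by_cases h : a ∈ ele <;> simp [h, PySem.Dict.insert_insert_self]

-- the values of A's combination_dict, in order
lemma combinationDictValues (l : List String) :
    ((PySem.List.pyRange 1 ((l.length : Int) + 1) 1).foldl
      (fun d c => d.insert c (PySem.List.combinations l c.toNat))
      (PySem.Dict.empty : PySem.Dict Int (List (List String)))).values
    = (List.range' 1 l.length).map (fun c => PySem.List.combinations l c) := by
  have hitems := PySem.Dict.items_foldl_insert_fresh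
    (l := PySem.List.pyRange 1 ((l.length : Int) + 1) 1)
    (k := fun c => c) (v := fun c => PySem.List.combinations l c.toNat)
    (d := (PySem.Dict.empty : PySem.Dict Int (List (List String))))
    (by intro a _; simp [PySem.Dict.contains_empty])
    (by simpa using PySem.List.nodup_pyRange_one 1 ((l.length : Int) + 1))
  have hemp : (PySem.Dict.empty : PySem.Dict Int (List (List String))).items = [] := rfl
  simp only [PySem.Dict.values, hitems, hemp, List.nil_append, List.map_map]
  rw [PySem.List.pyRange_one, List.range'_eq_map_range]
  have hlen : (((l.length : Int) + 1 - 1)).toNat = l.length := by omega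
  rw [hlen]
  simp only [List.map_map]
  apply List.map_congr_left
  intro k hk
  simp only [Function.comp]
  have h1 : ((1 : Int) + k).toNat = 1 + k := by omega
  rw [h1]

-- ===== VERDICT (by name: the statement is the Claim_ definition above) =====
theorem get_analysis_combination_spec : Claim_equal_get_analysis_combination := by
  intro l _
  unfold Spec_get_analysis_combination
  by_cases hl : l = []
  · subst hl; decide
  · simp only [get_analysis_combination, get_analysis_combination_alt]
    rw [combinationDictValues l]
    congr 1
    rw [List.foldl_map]
    congr 1
    apply PySem.List.foldl_congr_mem
    intro ad c _
    rw [pvCombosB_eq_combinations]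
    apply PySem.List.foldl_congr_mem
    intro ad' ele _
    rw [statusLoop ele (PySem.Str.join "_" ele) l hl, statusDict]
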